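-- pv_equiv track=rewrite | github.com/hlycharles/dota2-item-recommendation | feature_generator_rnn.py | get_recent_vals
-- ===== SOURCE A (Python) =====
-- def get_recent_vals(vals, time_slice, count = 1):
--     result = []
--     start_index = min(time_slice, len(vals) - 1)
--     for i in range(count):
--         index = start_index - i
--         val = 0
--         if (index >= 0):
--             val = vals[index]
--         result.append(val)
--     return result
-- ===== SOURCE B (Python) =====
-- def get_recent_vals(vals, time_slice, count = 1):
--     start = min(time_slice, len(vals) - 1)
--     if start < 0:
--         return [0] * max(count, 0)
--     lo = max(0, start - count + 1)
--     sub = vals[lo:start + 1][::-1]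
--     return sub + [0] * (count - len(sub))
-- ===== Notes on version B (the rewrite author's own statement) =====
-- stated objective: simpler
-- what changed: Replaces the index-by-index backward loop with a single slice of the valid contiguous block, reversed, then zero-padded to length count.
import Mathlib
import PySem

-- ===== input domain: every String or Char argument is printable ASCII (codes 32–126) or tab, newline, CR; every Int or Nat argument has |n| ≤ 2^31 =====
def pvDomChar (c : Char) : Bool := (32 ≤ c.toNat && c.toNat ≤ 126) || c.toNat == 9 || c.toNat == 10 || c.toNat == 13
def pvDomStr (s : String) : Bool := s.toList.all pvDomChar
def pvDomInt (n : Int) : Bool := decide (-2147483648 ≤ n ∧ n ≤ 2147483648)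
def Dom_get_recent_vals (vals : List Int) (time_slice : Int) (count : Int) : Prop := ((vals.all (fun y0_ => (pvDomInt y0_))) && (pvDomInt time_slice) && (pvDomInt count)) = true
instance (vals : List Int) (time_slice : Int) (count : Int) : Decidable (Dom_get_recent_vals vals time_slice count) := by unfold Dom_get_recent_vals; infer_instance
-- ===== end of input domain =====

-- B replaces A's index-by-index backward loop with slice-reverse-pad: simpler, same cost; A is total, so no Pre_.
-- ===== PORT A =====
-- Port of A: backward index loop appending vals[start-i] (0 if index negative).
def get_recent_vals (vals : List Int) (time_slice : Int) (count : Int) : List Int :=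
  let start_index := min time_slice ((vals.length : Int) - 1)
  (PySem.List.pyRange 0 count 1).foldl (fun result i =>
    let index := start_index - i
    let val := if index ≥ 0 then PySem.List.pyGetD vals index 0 else 0
    result ++ [val]) []

-- ===== PORT B =====
-- Port of B: slice the valid block, reverse, zero-pad. Simpler decomposition, same cost.
def get_recent_vals_alt (vals : List Int) (time_slice : Int) (count : Int) : List Int :=
  let start := min time_slice ((vals.length : Int) - 1)
  if start < 0 then List.replicate (max count 0).toNat 0
  else
    let lo := max 0 (start - count + 1)
    let sub := (PySem.List.slice vals (some lo) (some (start + 1))).reverse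
    sub ++ List.replicate (count - (sub.length : Int)).toNat 0

-- ===== PRECONDITION & SPEC =====
def Spec_get_recent_vals (vals : List Int) (time_slice : Int) (count : Int) (out : List Int) : Prop := out = get_recent_vals_alt vals time_slice count
instance (vals : List Int) (time_slice : Int) (count : Int) (out : List Int) : Decidable (Spec_get_recent_vals vals time_slice count out) := by unfold Spec_get_recent_vals; infer_instance

-- ===== CLAIM (what is proved, stated in full; the proofs are below) =====
def Claim_equal_get_recent_vals : Prop := ∀ (vals : List Int) (time_slice : Int) (count : Int), Dom_get_recent_vals vals time_slice count → Spec_get_recent_vals vals time_slice count (get_recent_vals vals time_slice count)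

-- ===== LEMMAS AND PROOFS =====

-- A's loop, written as a map over the loop counter.
theorem get_recent_vals_eq_map (vals : List Int) (ts count : Int) :
    get_recent_vals vals ts count = (List.range count.toNat).map (fun (k : Nat) =>
      if (0:Int) ≤ min ts ((vals.length:Int) - 1) - (k:Int)
      then PySem.List.pyGetD vals (min ts ((vals.length:Int) - 1) - (k:Int)) 0 else 0) := by
  unfold get_recent_vals
  simp only [PySem.List.foldl_append_singleton_eq_map, List.nil_append, PySem.List.pyRange_one,
    List.map_map, Int.sub_zero]
  apply List.map_congr_left
  intro k hk
  simp only [Function.comp, Int.zero_add, ge_iff_le]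

-- That map is B's slice-reverse-pad value.
theorem map_eq_alt (vals : List Int) (ts count : Int) :
    (List.range count.toNat).map (fun (k : Nat) =>
      if (0:Int) ≤ min ts ((vals.length:Int) - 1) - (k:Int)
      then PySem.List.pyGetD vals (min ts ((vals.length:Int) - 1) - (k:Int)) 0 else 0)
    = get_recent_vals_alt vals ts count := by
  unfold get_recent_vals_alt
  set s := min ts ((vals.length:Int) - 1) with hs
  have hsle : s ≤ (vals.length:Int) - 1 := min_le_right _ _
  clear_value s
  by_cases hneg : s < 0
  · rw [if_pos hneg]
    rw [List.eq_replicate_iff]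
    constructor
    · simp; omega
    · intro v hv
      simp only [List.mem_map, List.mem_range] at hv
      obtain ⟨k, hk, hvk⟩ := hv
      rw [if_neg (by omega)] at hvk
      omega
  · rw [if_neg hneg]
    have hs0 : (0:Int) ≤ s := by omega
    have hlen : 1 ≤ vals.length := by omega
    set lo := max 0 (s - count + 1) with hlo
    have hlo0 : (0:Int) ≤ lo := le_max_left _ _
    clear_value lo
    have hslice : PySem.List.slice vals (some lo) (some (s + 1))
        = (vals.drop lo.toNat).take ((s+1).toNat - lo.toNat) := by
      rw [show lo = ((lo.toNat : Nat) : Int) by omega,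
          show s + 1 = (((s+1).toNat : Nat) : Int) by omega,
          PySem.List.slice_natCast]
      simp only [Int.toNat_natCast]
    simp only [hslice]
    set a := lo.toNat with ha
    set b := (s+1).toNat with hb
    have hble : b ≤ vals.length := by omega
    have hsub : (((vals.drop a).take (b - a)).reverse).length = b - a := by
      simp; omega
    apply List.ext_getElem
    · simp only [List.length_map, List.length_range, List.length_append, hsub,
        List.length_replicate]
      omega
    · intro k hk1 hk2
      simp only [List.length_map, List.length_range] at hk1
      simp only [List.getElem_map, List.getElem_range]
      by_cases hkin : k < b - a
      · rw [List.getElem_append_left (by omega)]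
        rw [List.getElem_reverse, List.getElem_take, List.getElem_drop]
        have hpos : (0:Int) ≤ s - k := by omega
        rw [if_pos hpos]
        rw [show s - (k:Int) = (((s - (k:Int)).toNat : Nat) : Int) by omega,
            PySem.List.pyGetD_natCast]
        rw [List.getD_eq_getElem _ _ (by omega)]
        congr 1
        simp only [List.length_take, List.length_drop, List.length_reverse] at hsub ⊢
        omega
      · rw [List.getElem_append_right (by omega)]
        rw [List.getElem_replicate]
        rw [if_neg (by omega)]

-- ===== VERDICT (by name: the statement is the Claim_ definition above) =====
theorem get_recent_vals_spec : Claim_equal_get_recent_vals := by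
  intro vals ts count _
  unfold Spec_get_recent_vals
  rw [get_recent_vals_eq_map, map_eq_alt]
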